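-- pv_equiv track=rewrite | github.com/CodeGandee/auto-quantize-model | scripts/cv-models/make_yolov10m_candidate_schemes.py | _tokens_in_order
-- ===== SOURCE A (Python) =====
-- from typing import Any, Dict, List, Sequence
--
-- def _tokens_in_order(parts: List[str], tokens: List[str]) -> bool:
--     start = 0
--     for token in tokens:
--         try:
--             start = parts.index(token, start) + 1
--         except ValueError:
--             return False
--     return True
-- ===== SOURCE B (Python) =====
-- def _tokens_in_order(parts, tokens):
--     i = 0
--     for p in parts:
--         if i < len(tokens) and p == tokens[i]:
--             i += 1
--     return i == len(tokens)
-- ===== Notes on version B (the rewrite author's own statement) =====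
-- stated objective: idiomatic
-- what changed: Replaced the loop over tokens with repeated parts.index(token, start) searches (and try/except control flow) by the standard two-pointer subsequence scan: one loop over parts advancing an index into tokens by direct equality comparison.
import Mathlib
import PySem

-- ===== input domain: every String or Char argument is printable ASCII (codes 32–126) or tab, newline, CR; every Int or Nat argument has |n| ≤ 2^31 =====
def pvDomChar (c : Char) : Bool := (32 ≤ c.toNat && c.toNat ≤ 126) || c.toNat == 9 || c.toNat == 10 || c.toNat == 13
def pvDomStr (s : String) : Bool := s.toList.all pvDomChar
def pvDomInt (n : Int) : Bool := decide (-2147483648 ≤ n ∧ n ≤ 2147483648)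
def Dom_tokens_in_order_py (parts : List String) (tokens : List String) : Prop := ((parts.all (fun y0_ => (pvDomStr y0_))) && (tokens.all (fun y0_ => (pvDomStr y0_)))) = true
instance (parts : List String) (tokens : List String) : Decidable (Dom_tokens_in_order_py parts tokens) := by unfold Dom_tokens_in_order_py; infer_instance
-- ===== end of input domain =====

-- ===== PORT A =====
-- B is the standard two-pointer subsequence scan over parts instead of A's repeated
-- index-search per token; idiomatic rewrite, same cost, proved to return the same Bool.
-- A's 'parts.index(token, start)' is ported exactly as the first occurrence in
-- 'parts.drop start', with the absolute position recovered as start + j.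
def pvGoA (parts : List String) : List String → Nat → Bool
  | [], _ => true
  | t :: ts, start =>
    match PySem.List.index? (List.drop start parts) t with
    | some j => pvGoA parts ts (start + j + 1)
    | none => false

def tokens_in_order_py (parts : List String) (tokens : List String) : Bool :=
  pvGoA parts tokens 0

-- ===== PORT B =====
def tokens_in_order_py_alt (parts : List String) (tokens : List String) : Bool :=
  (parts.foldl (fun i p => if tokens[i]? = some p then i + 1 else i) 0) == tokens.length

-- ===== PRECONDITION & SPEC =====
def Spec_tokens_in_order_py (parts : List String) (tokens : List String) (out : Bool) : Prop := out = tokens_in_order_py_alt parts tokens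
instance (parts : List String) (tokens : List String) (out : Bool) : Decidable (Spec_tokens_in_order_py parts tokens out) := by unfold Spec_tokens_in_order_py; infer_instance

-- ===== CLAIM (what is proved, stated in full; the proofs are below) =====
def Claim_equal_tokens_in_order_py : Prop := ∀ (parts : List String) (tokens : List String), Dom_tokens_in_order_py parts tokens → Spec_tokens_in_order_py parts tokens (tokens_in_order_py parts tokens)

-- ===== LEMMAS AND PROOFS =====

-- greedy-subsequence reference predicate used only by the proofs
def pvSub : List String → List String → Bool
  | _, [] => true
  | [], _ :: _ => false
  | p :: ps, t :: ts => if p = t then pvSub ps ts else pvSub ps (t :: ts)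

theorem pvSub_nil_right (l : List String) : pvSub l [] = true := by
  cases l <;> rfl

theorem pvSub_nil_cons (t : String) (ts : List String) : pvSub [] (t :: ts) = false := rfl

theorem pvSub_cons_cons (p t : String) (ps ts : List String) :
    pvSub (p :: ps) (t :: ts) = if p = t then pvSub ps ts else pvSub ps (t :: ts) := rfl

theorem pvSub_not_mem (t : String) (ts : List String) :
    ∀ l : List String, t ∉ l → pvSub l (t :: ts) = false := by
  intro l
  induction l with
  | nil => intro _; rfl
  | cons p ps ih =>
    intro h
    have hpt : ¬ p = t := fun e => h (by simp [e])
    rw [pvSub_cons_cons, if_neg hpt]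
    exact ih (fun hm => h (List.mem_cons_of_mem _ hm))

theorem pvSub_skip (t : String) (ts suf : List String) :
    ∀ pre : List String, t ∉ pre → pvSub (pre ++ t :: suf) (t :: ts) = pvSub suf ts := by
  intro pre
  induction pre with
  | nil => intro _; rw [List.nil_append, pvSub_cons_cons, if_pos rfl]
  | cons p ps ih =>
    intro h
    have hpt : ¬ p = t := fun e => h (by simp [e])
    rw [List.cons_append, pvSub_cons_cons, if_neg hpt]
    exact ih (fun hm => h (List.mem_cons_of_mem _ hm))

theorem pvGoA_eq_sub (parts : List String) :
    ∀ tokens start, pvGoA parts tokens start = pvSub (List.drop start parts) tokens := by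
  intro tokens
  induction tokens with
  | nil => intro start; simp [pvGoA, pvSub_nil_right]
  | cons t ts ih =>
    intro start
    cases h : PySem.List.index? (List.drop start parts) t with
    | none =>
      have hnm : t ∉ List.drop start parts :=
        (PySem.List.index?_eq_none_iff (xs := List.drop start parts) (v := t)).mp h
      simp only [pvGoA]
      rw [h, pvSub_not_mem t ts _ hnm]
    | some j =>
      obtain ⟨pre, suf, hsplit, hlen, hnm⟩ :=
        (PySem.List.index?_eq_some_iff (xs := List.drop start parts) (v := t) (k := j)).mp h
      have hdrop : List.drop (start + j + 1) parts = suf := by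
        have h1 : pre ++ t :: suf = (pre ++ [t]) ++ suf := by simp
        have h2 : (pre ++ [t]).length = pre.length + 1 := by simp
        have h3 : List.drop (j + 1) (List.drop start parts) = suf := by
          rw [hsplit, h1, ← hlen, ← h2]
          exact List.drop_left
        rw [← h3, List.drop_drop]
        ring_nf
      simp only [pvGoA]
      rw [h]
      show pvGoA parts ts (start + j + 1) = _
      rw [ih (start + j + 1), hdrop, hsplit, pvSub_skip t ts suf pre hnm]

theorem pvFoldB_eq_sub (tokens : List String) :
    ∀ (parts : List String) (i : Nat), i ≤ tokens.length →
      ((parts.foldl (fun i p => if tokens[i]? = some p then i + 1 else i) i) == tokens.length)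
        = pvSub parts (List.drop i tokens) := by
  intro parts
  induction parts with
  | nil =>
    intro i hi
    simp only [List.foldl_nil]
    rcases Nat.lt_or_ge i tokens.length with hlt | hge
    · rw [List.drop_eq_getElem_cons hlt, pvSub_nil_cons]
      simp [Nat.ne_of_lt hlt]
    · have hi' : i = tokens.length := Nat.le_antisymm hi hge
      rw [hi', List.drop_length, pvSub_nil_right]
      simp
  | cons p ps ih =>
    intro i hi
    by_cases h : tokens[i]? = some p
    · have hlt : i < tokens.length := (List.getElem?_eq_some_iff.mp h).1
      have hti : tokens[i] = p := by
        obtain ⟨_, e⟩ := List.getElem?_eq_some_iff.mp h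
        exact e
      simp only [List.foldl_cons, if_pos h]
      rw [ih (i + 1) hlt, List.drop_eq_getElem_cons hlt, hti, pvSub_cons_cons, if_pos rfl]
    · simp only [List.foldl_cons, if_neg h]
      rw [ih i hi]
      rcases Nat.lt_or_ge i tokens.length with hlt | hge
      · have hne : ¬ p = tokens[i] := by
          intro e
          exact h (by simp [hlt, e.symm])
        rw [List.drop_eq_getElem_cons hlt, pvSub_cons_cons, if_neg hne]
      · have hnil : List.drop i tokens = [] := List.drop_eq_nil_of_le hge
        rw [hnil, pvSub_nil_right, pvSub_nil_right]

-- ===== VERDICT (by name: the statement is the Claim_ definition above) =====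
theorem tokens_in_order_py_spec : Claim_equal_tokens_in_order_py := by
  intro parts tokens _
  unfold Spec_tokens_in_order_py tokens_in_order_py tokens_in_order_py_alt
  rw [pvGoA_eq_sub parts tokens 0, pvFoldB_eq_sub tokens parts 0 (Nat.zero_le _)]
  simp
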